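-- pv_equiv track=rewrite | github.com/qiosion/machineLearning | 230425_prof_ver.py | solution_4_cntMethod
-- ===== SOURCE A (Python) =====
-- def solution_4_cntMethod (arg):
--     count = 0
--     min = len(arg)
--     max = -1
--     for num in arg:
--         count = arg.count(num)
--         if count > max:
--             max = count
--         if count < min:
--             min = count
--         answer = max // min
--     return answer
-- ===== SOURCE B (Python) =====
-- def solution_4_cntMethod(arg):
--     counts = {}
--     for num in arg:
--         counts[num] = counts.get(num, 0) + 1
--     vals = counts.values()
--     return max(vals) // min(vals)
-- ===== Notes on version B (the rewrite author's own statement) =====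
-- stated objective: faster
-- what changed: Replaces the per-element arg.count scan inside the loop by a single counting-dict pass followed by max/min over the distinct counts.
import Mathlib
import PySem

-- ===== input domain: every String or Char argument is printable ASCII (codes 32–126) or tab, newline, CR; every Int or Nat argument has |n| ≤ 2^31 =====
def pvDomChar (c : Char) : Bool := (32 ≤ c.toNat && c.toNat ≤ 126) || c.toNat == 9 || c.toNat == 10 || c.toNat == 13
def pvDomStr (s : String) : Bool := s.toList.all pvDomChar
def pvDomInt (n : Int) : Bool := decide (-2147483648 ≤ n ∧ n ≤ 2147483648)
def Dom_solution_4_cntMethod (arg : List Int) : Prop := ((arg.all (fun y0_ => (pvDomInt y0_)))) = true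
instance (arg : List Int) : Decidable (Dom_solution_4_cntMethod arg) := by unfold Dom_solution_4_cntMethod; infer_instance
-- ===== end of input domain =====

-- B builds a counting dict in one pass and returns max(counts)//min(counts), replacing A's
-- quadratic repeated arg.count scans (objective: faster).


-- ===== PORT A =====
-- one iteration of A's loop body; state = (min, max, answer); `count` is loop-local in A
def pvAStep (f : Int → Int) (st : Int × Int × Option Int) (num : Int) : Int × Int × Option Int :=
  let count := f num
  let mx := if count > st.2.1 then count else st.2.1
  let mn := if count < st.1 then count else st.1
  (mn, mx, some (PySem.Int.floordiv mx mn))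

def solution_4_cntMethod (arg : List Int) : Int :=
  -- count = 0 is dead (reassigned before any use); min = len(arg); max = -1; answer unbound = none
  let st := arg.foldl (pvAStep (fun num => ((arg.count num : Nat) : Int)))
      ((arg.length : Int), -1, none)
  st.2.2.getD 0   -- none ↔ UnboundLocalError on empty arg, excluded by Pre_

-- ===== PORT B =====
def solution_4_cntMethod_alt (arg : List Int) : Int :=
  let counts := arg.foldl (fun (d : PySem.Dict Int Int) x => d.insert x (d.getD x 0 + 1)) PySem.Dict.empty
  let vals := counts.values
  match PySem.List.max? vals (fun y => y), PySem.List.min? vals (fun y => y) with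
  | some M, some m => PySem.Int.floordiv M m
  | _, _ => 0   -- max()/min() on empty vals raise ValueError; excluded by Pre_

-- ===== PRECONDITION & SPEC =====
-- A raises UnboundLocalError on the empty list (answer never assigned); B's max() raises ValueError there.
def Pre_solution_4_cntMethod (arg : List Int) : Prop := arg ≠ []
instance (arg : List Int) : Decidable (Pre_solution_4_cntMethod arg) := by unfold Pre_solution_4_cntMethod; infer_instance
def pvWitness_solution_4_cntMethod : List Int := [1, 2, 2]

def Spec_solution_4_cntMethod (arg : List Int) (out : Int) : Prop := out = solution_4_cntMethod_alt arg
instance (arg : List Int) (out : Int) : Decidable (Spec_solution_4_cntMethod arg out) := by unfold Spec_solution_4_cntMethod; infer_instance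

-- ===== CLAIM (what is proved, stated in full; the proofs are below) =====
def Claim_equal_solution_4_cntMethod : Prop := ∀ (arg : List Int), Dom_solution_4_cntMethod arg → Pre_solution_4_cntMethod arg → Spec_solution_4_cntMethod arg (solution_4_cntMethod arg)

-- ===== LEMMAS AND PROOFS =====

-- the `answer` slot always holds max // min of the current min/max once it has been assigned
theorem pvAStep_ans (f : Int → Int) :
    ∀ (l : List Int) (st : Int × Int × Option Int),
      st.2.2 = some (PySem.Int.floordiv st.2.1 st.1) →
      (l.foldl (pvAStep f) st).2.2 =
        some (PySem.Int.floordiv (l.foldl (pvAStep f) st).2.1 (l.foldl (pvAStep f) st).1) := by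
  intro l
  induction l with
  | nil => intro st h; simpa using h
  | cons x t ih =>
      intro st _
      simpa [List.foldl_cons] using ih (pvAStep f st x) rfl

-- the min/max slots are the running min/max of f over the list (attained or untouched, and bounding)
theorem pvAStep_minmax (f : Int → Int) :
    ∀ (l : List Int) (st : Int × Int × Option Int),
      ((l.foldl (pvAStep f) st).1 = st.1 ∨ ∃ a ∈ l, (l.foldl (pvAStep f) st).1 = f a) ∧
      (l.foldl (pvAStep f) st).1 ≤ st.1 ∧
      (∀ a ∈ l, (l.foldl (pvAStep f) st).1 ≤ f a) ∧
      ((l.foldl (pvAStep f) st).2.1 = st.2.1 ∨ ∃ a ∈ l, (l.foldl (pvAStep f) st).2.1 = f a) ∧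
      st.2.1 ≤ (l.foldl (pvAStep f) st).2.1 ∧
      (∀ a ∈ l, f a ≤ (l.foldl (pvAStep f) st).2.1) := by
  intro l
  induction l with
  | nil => intro st; simp
  | cons x t ih =>
      intro st
      obtain ⟨h1, h2, h3, h4, h5, h6⟩ := ih (pvAStep f st x)
      have hmn : (pvAStep f st x).1 = f x ∨ (pvAStep f st x).1 = st.1 := by
        simp only [pvAStep]; split_ifs <;> simp
      have hmn' : (pvAStep f st x).1 ≤ st.1 ∧ (pvAStep f st x).1 ≤ f x := by
        simp only [pvAStep]; split_ifs with h <;> omega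
      have hmx : (pvAStep f st x).2.1 = f x ∨ (pvAStep f st x).2.1 = st.2.1 := by
        simp only [pvAStep]; split_ifs <;> simp
      have hmx' : st.2.1 ≤ (pvAStep f st x).2.1 ∧ f x ≤ (pvAStep f st x).2.1 := by
        simp only [pvAStep]; split_ifs with h <;> omega
      rw [List.foldl_cons]
      refine ⟨?_, ?_, ?_, ?_, ?_, ?_⟩
      · rcases h1 with h | ⟨a, ha, he⟩
        · rcases hmn with h' | h'
          · exact Or.inr ⟨x, List.mem_cons_self, by omega⟩
          · exact Or.inl (by omega)
        · exact Or.inr ⟨a, List.mem_cons_of_mem _ ha, he⟩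
      · omega
      · intro a ha
        rcases List.mem_cons.mp ha with rfl | ha'
        · omega
        · exact h3 a ha'
      · rcases h4 with h | ⟨a, ha, he⟩
        · rcases hmx with h' | h'
          · exact Or.inr ⟨x, List.mem_cons_self, by omega⟩
          · exact Or.inl (by omega)
        · exact Or.inr ⟨a, List.mem_cons_of_mem _ ha, he⟩
      · omega
      · intro a ha
        rcases List.mem_cons.mp ha with rfl | ha'
        · omega
        · exact h6 a ha'

-- B's value list is the counts of the distinct elements of arg
theorem pvB_vals (arg : List Int) :
    (arg.foldl (fun (d : PySem.Dict Int Int) x => d.insert x (d.getD x 0 + 1)) PySem.Dict.empty).values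
      = (PySem.Set.ofList arg).map (fun k => ((arg.count k : Nat) : Int)) := by
  rw [PySem.Dict.foldl_insert_getD_add_one_eq_counter]
  rw [PySem.Dict.values_eq_map_keys _ (PySem.Dict.nodup_keys_counter arg) 0]
  rw [PySem.Dict.keys_counter]
  refine List.map_congr_left ?_
  intro k hk
  rw [PySem.Dict.getD_counter]

-- ===== VERDICT (by name: the statement is the Claim_ definition above) =====
theorem solution_4_cntMethod_spec : Claim_equal_solution_4_cntMethod := by
  intro arg _ hpre
  unfold Spec_solution_4_cntMethod
  simp only [solution_4_cntMethod, solution_4_cntMethod_alt]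
  obtain ⟨x, t, rfl⟩ := List.exists_cons_of_ne_nil hpre
  set arg := x :: t with harg
  set f : Int → Int := fun num => ((arg.count num : Nat) : Int) with hf
  -- A's final state
  set st := arg.foldl (pvAStep f) ((arg.length : Int), -1, none) with hst
  have hans : st.2.2 = some (PySem.Int.floordiv st.2.1 st.1) := by
    rw [hst, harg, List.foldl_cons]
    exact pvAStep_ans f t (pvAStep f ((arg.length : Int), -1, none) x) rfl
  obtain ⟨hmn1, _, hmn3, hmx1, _, hmx3⟩ := pvAStep_minmax f arg ((arg.length : Int), -1, none)
  rw [← hst] at hmn1 hmn3 hmx1 hmx3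
  have hcx : 1 ≤ f x := by
    have := List.count_pos_iff.mpr (List.mem_cons_self (a := x) (l := t))
    simp only [hf]; exact_mod_cast this
  -- A's max is attained and bounds all counts
  have hmxA : ∃ a ∈ arg, st.2.1 = f a := by
    rcases hmx1 with h | h
    · exfalso; have := hmx3 x List.mem_cons_self; simp at h; omega
    · exact h
  -- A's min is attained
  have hmnA : ∃ a ∈ arg, st.1 = f a := by
    rcases hmn1 with h | h
    · refine ⟨x, List.mem_cons_self, ?_⟩
      have hle : f x ≤ (arg.length : Int) := by
        have := List.count_le_length (l := arg) (a := x)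
        simp only [hf]; exact_mod_cast this
      have := hmn3 x List.mem_cons_self
      simp at h; omega
    · exact h
  -- B's side
  rw [pvB_vals arg]
  set vals := (PySem.Set.ofList arg).map (fun k => ((arg.count k : Nat) : Int)) with hvals
  have hfvals : ∀ a ∈ arg, f a ∈ vals := by
    intro a ha
    rw [hvals]
    exact List.mem_map.mpr ⟨a, (PySem.Set.mem_ofList _ _).mpr ha, rfl⟩
  have hvalsf : ∀ v ∈ vals, ∃ a ∈ arg, v = f a := by
    intro v hv
    obtain ⟨a, ha, he⟩ := List.mem_map.mp hv
    exact ⟨a, (PySem.Set.mem_ofList _ _).mp ha, he.symm⟩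
  have hne : vals ≠ [] := by
    intro h; exact (List.mem_nil_iff _).mp (h ▸ hfvals x List.mem_cons_self)
  obtain ⟨M, hM⟩ : ∃ M, PySem.List.max? vals (fun y => y) = some M := by
    cases hmax : PySem.List.max? vals (fun y => y) with
    | none => exact absurd ((PySem.List.max?_eq_none_iff _ _).mp hmax) hne
    | some M => exact ⟨M, rfl⟩
  obtain ⟨m, hm⟩ : ∃ m, PySem.List.min? vals (fun y => y) = some m := by
    cases hmin : PySem.List.min? vals (fun y => y) with
    | none => exact absurd ((PySem.List.min?_eq_none_iff _ _).mp hmin) hne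
    | some m => exact ⟨m, rfl⟩
  rw [hM, hm, hans]
  -- the two maxima agree, the two minima agree
  obtain ⟨aM, haM, heM⟩ := hvalsf M (PySem.List.max?_mem hM)
  obtain ⟨am, ham, hem⟩ := hvalsf m (PySem.List.min?_mem hm)
  obtain ⟨bM, hbM, heb⟩ := hmxA
  obtain ⟨bm, hbm, hebm⟩ := hmnA
  have h1 : st.2.1 ≤ M := heb ▸ PySem.List.max?_isMax hM _ (hfvals bM hbM)
  have h2 : M ≤ st.2.1 := heM ▸ hmx3 aM haM
  have h3 : m ≤ st.1 := hebm ▸ PySem.List.min?_isMin hm _ (hfvals bm hbm)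
  have h4 : st.1 ≤ m := hem ▸ hmn3 am ham
  have : st.2.1 = M ∧ st.1 = m := ⟨le_antisymm h1 h2, le_antisymm h4 h3⟩
  simp [this.1, this.2]
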